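-- pv_equiv track=rewrite | github.com/laisuk/OpenccPyo3Gui | pdf_module/cjk_text.py | last_two_non_whitespace
-- ===== SOURCE A (Python) =====
-- from typing import Optional, Tuple
--
-- def last_two_non_whitespace(s: str) -> Optional[Tuple[str, str]]:
--     """Return (last, prev) non-whitespace characters, or None if not enough."""
--     last: Optional[str] = None
--
--     i = len(s) - 1
--     while i >= 0:
--         ch = s[i]
--         if not ch.isspace():
--             if last is None:
--                 last = ch
--             else:
--                 return last, ch
--         i -= 1
--
--     return None
-- ===== SOURCE B (Python) =====
-- from typing import Optional, Tuple
--
-- def last_two_non_whitespace(s: str) -> Optional[Tuple[str, str]]: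
--     """Return (last, prev) non-whitespace characters, or None if not enough."""
--     cleaned = [c for c in s if not c.isspace()]
--     if len(cleaned) < 2:
--         return None
--     return cleaned[-1], cleaned[-2]
-- ===== Notes on version B (the rewrite author's own statement) =====
-- stated objective: simpler
-- what changed: Replaces the backward scan that tracks the most recent non-whitespace character and returns early by a single forward filter collecting all non-whitespace characters, then indexing the final two.
import Mathlib
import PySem

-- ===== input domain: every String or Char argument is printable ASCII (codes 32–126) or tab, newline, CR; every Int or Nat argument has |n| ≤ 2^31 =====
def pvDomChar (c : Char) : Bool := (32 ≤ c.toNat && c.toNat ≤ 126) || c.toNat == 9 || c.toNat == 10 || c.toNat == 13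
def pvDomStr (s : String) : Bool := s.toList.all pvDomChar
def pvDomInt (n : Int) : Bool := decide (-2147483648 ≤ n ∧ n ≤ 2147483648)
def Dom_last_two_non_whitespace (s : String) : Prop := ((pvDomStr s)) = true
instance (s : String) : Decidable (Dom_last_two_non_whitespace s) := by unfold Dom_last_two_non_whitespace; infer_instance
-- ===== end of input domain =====

-- B replaces the backward scan with early exit by a forward filter then indexing the last two; objective: simpler.
-- ===== PORT A =====
-- the while loop of A: walks the characters from the end, tracking the last non-whitespace char seen
def pvGoA : List Char → Option Char → Option (String × String)
  | [], _ => none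
  | c :: rest, last =>
    if PySem.Chars.isspace c then pvGoA rest last
    else
      match last with
      | none => pvGoA rest (some c)
      | some l => some (String.ofList [l], String.ofList [c])

def last_two_non_whitespace (s : String) : Option (String × String) :=
  pvGoA s.toList.reverse none

-- ===== PORT B =====
def last_two_non_whitespace_alt (s : String) : Option (String × String) :=
  let cleaned := s.toList.filter (fun c => ! PySem.Chars.isspace c)
  if cleaned.length < 2 then none
  else
    match PySem.List.pyGet? cleaned (-1), PySem.List.pyGet? cleaned (-2) with
    | some a, some b => some (String.ofList [a], String.ofList [b])
    | _, _ => none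

-- ===== PRECONDITION & SPEC =====
def Spec_last_two_non_whitespace (s : String) (out : Option (String × String)) : Prop := out = last_two_non_whitespace_alt s
instance (s : String) (out : Option (String × String)) : Decidable (Spec_last_two_non_whitespace s out) := by unfold Spec_last_two_non_whitespace; infer_instance

-- ===== CLAIM (what is proved, stated in full; the proofs are below) =====
def Claim_equal_last_two_non_whitespace : Prop := ∀ (s : String), Dom_last_two_non_whitespace s → Spec_last_two_non_whitespace s (last_two_non_whitespace s)

-- ===== LEMMAS AND PROOFS =====

-- ===== VERDICT (by name: the statement is the Claim_ definition above) =====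
-- pvGoA over a list computes the first two survivors of the whitespace filter
theorem pvGoA_filter (l : List Char) (last : Option Char) :
    pvGoA l last =
      match last, l.filter (fun c => ! PySem.Chars.isspace c) with
      | none, a :: b :: _ => some (String.ofList [a], String.ofList [b])
      | some lch, b :: _ => some (String.ofList [lch], String.ofList [b])
      | _, _ => none := by
  induction l generalizing last with
  | nil => cases last <;> rfl
  | cons c rest ih =>
    by_cases h : PySem.Chars.isspace c
    · cases last <;> simp [pvGoA, h, ih]
    · cases last with
      | some l => simp [pvGoA, h]
      | none =>
        simp only [pvGoA, h, ih, List.filter_cons, Bool.not_eq_true']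
        simp
        cases List.filter (fun c => ! PySem.Chars.isspace c) rest <;> rfl

theorem last_two_non_whitespace_spec : Claim_equal_last_two_non_whitespace := by
  intro s _
  show last_two_non_whitespace s = last_two_non_whitespace_alt s
  unfold last_two_non_whitespace last_two_non_whitespace_alt
  simp only [pvGoA_filter, List.filter_reverse]
  generalize List.filter (fun c => ! PySem.Chars.isspace c) s.toList = cl
  cases hrl : cl.reverse with
  | nil =>
    have : cl = [] := by simpa using congrArg List.reverse hrl
    simp [this]
  | cons a tl =>
    cases tl with
    | nil =>
      have : cl = [a] := by simpa using congrArg List.reverse hrl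
      simp [this]
    | cons b t =>
      have hc : cl = (t.reverse ++ [b]) ++ [a] := by
        have := congrArg List.reverse hrl
        simpa [List.reverse_cons, List.append_assoc] using this
      rw [hc]
      have hlen : ¬ ((t.reverse ++ [b]) ++ [a]).length < 2 := by
        simp
      rw [if_neg hlen]
      rw [PySem.List.pyGet?_neg_one_append_singleton]
      rw [PySem.List.pyGet?_neg_ofNat _ 2 (by omega) (by simp)]
      simp
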